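-- pv_equiv track=rewrite | github.com/Jasman-py/Twitter-sentiment-analyser | twitter.py | adjust_for_negation
-- ===== SOURCE A (Python) =====
-- def adjust_for_negation(text, polarity):
--     negations = ["not", "no", "never", "n't"]
--     positive_words = ["good", "happy", "great", "excellent", "amazing", "love"]
--     lowered = text.lower()
--     for neg in negations:
--         for pos_word in positive_words:
--             if f"{neg} {pos_word}" in lowered:
--                 return -abs(polarity)
--     return polarity
-- ===== SOURCE B (Python) =====
-- _NEGATIONS = ("not", "no", "never", "n't")
-- _POSITIVE = ("good", "happy", "great", "excellent", "amazing", "love")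
-- _PHRASES = tuple(f"{n} {p}" for n in _NEGATIONS for p in _POSITIVE)
--
--
-- def adjust_for_negation(text, polarity):
--     lowered = text.lower()
--     for i in range(len(lowered)):
--         if any(lowered.startswith(p, i) for p in _PHRASES):
--             return -abs(polarity)
--     return polarity
-- ===== Notes on version B (the rewrite author's own statement) =====
-- stated objective: alternative
-- what changed: Loop inversion: instead of 24 separate whole-text substring searches (one per negation x positive-word pair), B precomputes the phrase list once and makes a single left-to-right scan over text positions, checking at each position whether any phrase starts there.
import Mathlib
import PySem

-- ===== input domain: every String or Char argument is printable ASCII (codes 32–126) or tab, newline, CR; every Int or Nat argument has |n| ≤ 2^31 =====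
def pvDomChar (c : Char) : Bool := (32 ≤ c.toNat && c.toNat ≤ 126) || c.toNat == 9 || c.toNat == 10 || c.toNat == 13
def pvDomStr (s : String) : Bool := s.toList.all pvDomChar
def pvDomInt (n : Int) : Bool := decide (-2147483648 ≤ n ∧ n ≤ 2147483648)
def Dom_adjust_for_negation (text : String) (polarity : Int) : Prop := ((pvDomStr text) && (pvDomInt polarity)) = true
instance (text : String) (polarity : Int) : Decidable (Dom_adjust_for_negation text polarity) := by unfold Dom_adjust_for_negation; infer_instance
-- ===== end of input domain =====

-- B inverts A's loops: one left-to-right scan over text positions against a precomputed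
-- phrase list, instead of 24 whole-text substring searches (alternative; same result).

-- ===== PORT A =====
-- The early-return double loop is ported as nested `any` (it returns the same -|polarity|
-- whichever pair matches, so first-match order is irrelevant to the value).
def adjust_for_negation (text : String) (polarity : Int) : Int :=
  let negations : List String := ["not", "no", "never", "n't"]
  let positive_words : List String := ["good", "happy", "great", "excellent", "amazing", "love"]
  let lowered := PySem.Str.lower text
  if negations.any (fun neg =>
      positive_words.any (fun pos => PySem.Str.isIn (neg ++ " " ++ pos) lowered)) then
    -|polarity|
  else
    polarity

-- ===== PORT B =====
-- the module-level _PHRASES tuple of Source B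
def pvPhrases : List (List Char) :=
  (["not", "no", "never", "n't"].map String.toList).flatMap fun n =>
    (["good", "happy", "great", "excellent", "amazing", "love"].map String.toList).map fun p =>
      n ++ ' ' :: p

-- range(len(lowered)) ported as List.range; lowered.startswith(p, i) ported as a prefix
-- check on (lowered.drop i) — exact for 0 ≤ i.
def adjust_for_negation_alt (text : String) (polarity : Int) : Int :=
  let lowered := PySem.Chars.lower text.toList
  if (List.range lowered.length).any (fun i =>
      pvPhrases.any fun p => PySem.Chars.startswith (lowered.drop i) p) then
    -|polarity|
  else
    polarity

-- ===== PRECONDITION & SPEC =====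
def Spec_adjust_for_negation (text : String) (polarity : Int) (out : Int) : Prop := out = adjust_for_negation_alt text polarity
instance (text : String) (polarity : Int) (out : Int) : Decidable (Spec_adjust_for_negation text polarity out) := by unfold Spec_adjust_for_negation; infer_instance

-- ===== CLAIM (what is proved, stated in full; the proofs are below) =====
def Claim_equal_adjust_for_negation : Prop := ∀ (text : String) (polarity : Int), Dom_adjust_for_negation text polarity → Spec_adjust_for_negation text polarity (adjust_for_negation text polarity)

-- ===== LEMMAS AND PROOFS =====

-- `sub in s` equals "some position i < len(s) has sub as a prefix of s[i:]" for nonempty sub.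
theorem pv_isIn_eq_range_any (ph s : List Char) (h : ph ≠ []) :
    PySem.Chars.isIn ph s
      = (List.range s.length).any (fun i => PySem.Chars.startswith (s.drop i) ph) := by
  rw [Bool.eq_iff_iff]
  simp only [List.any_eq_true, List.mem_range, PySem.Chars.startswith_iff]
  constructor
  · intro hin
    obtain ⟨j, hj⟩ := (PySem.Chars.exists_prefix_drop_iff_isIn ph s).mpr hin
    refine ⟨j, ?_, hj⟩
    by_contra hge
    have hnil : s.drop j = [] := List.drop_eq_nil_iff.mpr (by omega)
    rw [hnil] at hj
    exact h (List.prefix_nil.mp hj)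
  · rintro ⟨i, -, hp⟩
    exact (PySem.Chars.exists_prefix_drop_iff_isIn ph s).mp ⟨i, hp⟩

theorem pv_any_swap {α β : Type} (l₁ : List α) (l₂ : List β) (f : α → β → Bool) :
    l₁.any (fun a => l₂.any fun b => f a b) = l₂.any (fun b => l₁.any fun a => f a b) := by
  rw [Bool.eq_iff_iff]
  simp only [List.any_eq_true]
  tauto

-- every phrase is nonempty
theorem pv_phrases_ne : ∀ p ∈ pvPhrases, p ≠ [] := by decide

theorem pv_any_congr {α : Type} (l : List α) {p q : α → Bool}
    (h : ∀ a ∈ l, p a = q a) : l.any p = l.any q := by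
  induction l with
  | nil => rfl
  | cons a t ih =>
      simp only [List.any_cons, h a (List.mem_cons_self ..),
        ih (fun b hb => h b (List.mem_cons_of_mem a hb))]

theorem pv_range_any_eq (s : List Char) :
    (List.range s.length).any (fun i =>
        pvPhrases.any fun p => PySem.Chars.startswith (s.drop i) p)
      = pvPhrases.any (fun p => PySem.Chars.isIn p s) := by
  rw [pv_any_swap]
  exact pv_any_congr pvPhrases (fun p hp => (pv_isIn_eq_range_any p s (pv_phrases_ne p hp)).symm)

theorem adjust_for_negation_spec : Claim_equal_adjust_for_negation := by
  intro text polarity _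
  show adjust_for_negation text polarity = adjust_for_negation_alt text polarity
  unfold adjust_for_negation adjust_for_negation_alt
  simp only [pv_range_any_eq]
  have hsp : (" " : String).toList = [' '] := rfl
  simp only [pvPhrases, List.flatMap_cons, List.flatMap_nil, List.map_cons, List.map_nil,
    List.any_append, List.any_cons, List.any_nil, List.append_nil,
    PySem.Str.isIn_eq, PySem.Str.toList_lower, String.toList_append, hsp,
    List.append_assoc, List.singleton_append, Bool.or_false, Bool.or_assoc]
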